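-- pv_equiv track=rewrite | github.com/jirijanecek77/coding-challenges | src/main/python/advent/year_2024/aoc_14.py | check
-- ===== SOURCE A (Python) =====
-- max_y = 103
--
-- def check(robots) -> bool:
--     data = sorted([robot[0] for robot in robots])
--     for row in range(max_y):
--         cols = [col for col, r in data if r == row]
--         count = 1
--         for i in range(1, len(cols)):
--             if cols[i] == cols[i - 1] + 1:
--                 count += 1  # Increment the count for consecutive numbers
--                 # Check if the count is 10
--                 if count >= 10:
--                     return True
--             # If the sequence breaks, reset the count
--             elif cols[i] != cols[i - 1]:
--                 count = 1
--     return False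
-- ===== SOURCE B (Python) =====
-- max_y = 103
--
-- def check(robots) -> bool:
--     # Group column coordinates by row in one pass, then scan each row's
--     # sorted columns once for a run of 10 consecutive values.
--     buckets = {}
--     for robot in robots:
--         col, row = robot[0]
--         buckets[row] = buckets.get(row, []) + [col]
--     for row, cols in buckets.items():
--         if 0 <= row < max_y:
--             cols = sorted(cols)
--             count = 1
--             for i in range(1, len(cols)):
--                 if cols[i] == cols[i - 1] + 1:
--                     count += 1
--                     if count >= 10:
--                         return True
--                 elif cols[i] != cols[i - 1]:
--                     count = 1
--     return False
-- ===== Notes on version B (the rewrite author's own statement) =====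
-- stated objective: faster
-- what changed: Instead of sorting all points globally and re-filtering the whole list once per each of the 103 rows, B groups columns by row into a dict in one pass and scans each bucket's sorted columns once.
import Mathlib
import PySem

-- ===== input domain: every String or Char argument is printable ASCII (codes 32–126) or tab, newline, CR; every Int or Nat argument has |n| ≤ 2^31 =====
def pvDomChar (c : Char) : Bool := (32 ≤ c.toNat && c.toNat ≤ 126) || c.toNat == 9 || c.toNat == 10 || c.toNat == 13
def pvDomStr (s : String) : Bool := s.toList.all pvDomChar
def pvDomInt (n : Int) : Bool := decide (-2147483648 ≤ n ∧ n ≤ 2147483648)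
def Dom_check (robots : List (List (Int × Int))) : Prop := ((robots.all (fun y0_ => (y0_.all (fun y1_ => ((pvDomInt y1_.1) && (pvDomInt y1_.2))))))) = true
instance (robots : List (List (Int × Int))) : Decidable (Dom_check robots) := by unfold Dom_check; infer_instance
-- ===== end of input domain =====

-- B buckets the points by row in one pass (dict) instead of A's global sort plus a
-- fresh filtering scan of all points for each of the 103 rows; same result, fewer passes.

-- ===== PORT A =====
-- Shared inner loop: both Pythons contain the textually identical scan of a sorted
-- column list for a run of 10 consecutive values ('for i in range(1, len(cols)): …',
-- comparing cols[i] with cols[i-1] and threading 'count' with an early return True).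
def consecScan (prev count : Int) : List Int → Bool
  | [] => false
  | c :: rest =>
    if c = prev + 1 then
      (if count + 1 ≥ 10 then true else consecScan c (count + 1) rest)
    else if c ≠ prev then consecScan c 1 rest
    else consecScan c count rest

def rowScan : List Int → Bool
  | [] => false
  | c :: rest => consecScan c 1 rest

-- A: data = sorted list of the points robot[0]; for row in range(103): filter, scan.
-- (robot[0] raises IndexError on an empty robot: excluded by Pre_check; the (0,0)
-- default below is never reached under Pre_check.)
def check (robots : List (List (Int × Int))) : Bool :=
  (PySem.List.pyRange 0 103).any (fun row =>
    rowScan ((((PySem.List.sorted2 (robots.map (fun robot => (PySem.List.pyGet? robot 0).getD (0, 0)))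
        (fun p => p.1) (fun p => p.2) false)).filter (fun p => p.2 == row)).map (fun p => p.1)))

-- ===== PORT B =====
-- B: one pass building row -> list of columns (buckets[row] = buckets.get(row, []) + [col]),
-- then for each (row, cols) item with 0 <= row < 103 scan sorted(cols).
def check_alt (robots : List (List (Int × Int))) : Bool :=
  (robots.foldl (fun d robot =>
      let p := (PySem.List.pyGet? robot 0).getD (0, 0)
      d.modify p.2 [] (fun v => v ++ [p.1])) PySem.Dict.empty).items.any (fun rc =>
    (0 ≤ rc.1 && rc.1 < 103) && rowScan (PySem.List.sorted rc.2 (fun x => x) false))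

-- ===== PRECONDITION & SPEC =====
-- Pre_check excludes only inputs on which the Python A raises IndexError (an empty inner list,
-- where robot[0] has no value); A returns normally on every other input of the type.
def Pre_check (robots : List (List (Int × Int))) : Prop := ∀ robot ∈ robots, robot ≠ []
instance (robots : List (List (Int × Int))) : Decidable (Pre_check robots) := by unfold Pre_check; infer_instance
def pvWitness_check : (List (List (Int × Int))) := [[(1, 2)], [(3, 2)], [(4, 2)]]

def Spec_check (robots : List (List (Int × Int))) (out : Bool) : Prop := out = check_alt robots
instance (robots : List (List (Int × Int))) (out : Bool) : Decidable (Spec_check robots out) := by unfold Spec_check; infer_instance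

-- ===== CLAIM (what is proved, stated in full; the proofs are below) =====
def Claim_equal_check : Prop := ∀ (robots : List (List (Int × Int))), Dom_check robots → Pre_check robots → Spec_check robots (check robots)

-- ===== LEMMAS AND PROOFS =====

-- the extracted points, as both ports compute them
def pvPts (robots : List (List (Int × Int))) : List (Int × Int) :=
  robots.map (fun robot => (PySem.List.pyGet? robot 0).getD (0, 0))

-- sorted2 with keys fst, snd sorts by the lexicographic order on Int × Int
lemma sorted2_lex_pairwise (xs : List (Int × Int)) :
    List.Pairwise (fun a b => (toLex a : Lex (Int × Int)) ≤ toLex b)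
      (PySem.List.sorted2 xs (fun p => p.1) (fun p => p.2) false) := by
  have hbefore : (fun a b : Int × Int =>
        decide (a.1 < b.1) || (!decide (b.1 < a.1) && decide (a.2 < b.2)))
      = (fun a b : Int × Int => decide ((toLex a : Lex (Int × Int)) < toLex b)) := by
    funext a b
    simp only [Prod.Lex.lt_iff, ofLex_toLex]
    rcases lt_trichotomy a.1 b.1 with h | h | h
    · simp [h]
    · simp [h]
    · simp [asymm h, ne_of_gt h]
      omega
  show List.Pairwise _ (xs.foldl (fun acc x => PySem.List.insertBy _ x acc) [])
  rw [show (fun a b : Int × Int =>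
        decide (a.1 < b.1) || (!decide (b.1 < a.1) && decide (a.2 < b.2))) =
      (fun a b : Int × Int => decide ((toLex a : Lex (Int × Int)) < toLex b)) from hbefore]
  have key : ∀ (l : List (Int × Int)) (acc : List (Int × Int)),
      List.Pairwise (fun a b => (toLex a : Lex (Int × Int)) ≤ toLex b) acc →
      List.Pairwise (fun a b => (toLex a : Lex (Int × Int)) ≤ toLex b)
        (l.foldl (fun acc x =>
          PySem.List.insertBy (fun a b => decide ((toLex a : Lex (Int × Int)) < toLex b)) x acc) acc) := by
    intro l
    induction l with
    | nil => intro acc h; simpa using h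
    | cons x t ih =>
      intro acc h
      exact ih _ (PySem.List.insertBy_pairwise_le (fun p => (toLex p : Lex (Int × Int))) x acc h)
  exact key xs [] List.Pairwise.nil

-- A's per-row column list (filter of the globally sorted data) IS sorted(columns of the row)
lemma colsA_eq (xs : List (Int × Int)) (row : Int) :
    ((PySem.List.sorted2 xs (fun p => p.1) (fun p => p.2) false).filter
        (fun p => p.2 == row)).map (fun p => p.1)
    = PySem.List.sorted ((xs.filter (fun p => p.2 == row)).map (fun p => p.1)) (fun x => x) false := by
  symm
  apply PySem.List.sorted_id_eq_of_perm_of_pairwise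
  · exact ((PySem.List.sorted2_perm xs _ _ false).filter _).map _
  · have h1 := (sorted2_lex_pairwise xs).filter (fun p => p.2 == row)
    have h2 : List.Pairwise (fun a b : Int × Int => a.1 ≤ b.1)
        ((PySem.List.sorted2 xs (fun p => p.1) (fun p => p.2) false).filter (fun p => p.2 == row)) := by
      refine h1.imp_of_mem ?_
      intro a b ha hb hab
      have ha2 : a.2 = row := by simpa using (List.mem_filter.mp ha).2
      have hb2 : b.2 = row := by simpa using (List.mem_filter.mp hb).2
      rcases Prod.Lex.le_iff.mp hab with h | ⟨h, _⟩
      · exact le_of_lt h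
      · exact le_of_eq h
    exact h2.map _ (fun a b h => h)

-- B's bucket for row r holds exactly the columns of the points in row r, in input order
lemma buckets_getD (robots : List (List (Int × Int))) (r : Int) :
    (robots.foldl (fun d robot =>
        let p := (PySem.List.pyGet? robot 0).getD (0, 0)
        d.modify p.2 [] (fun v => v ++ [p.1])) PySem.Dict.empty).getD r []
    = ((pvPts robots).filter (fun p => p.2 == r)).map (fun p => p.1) := by
  have h : robots.foldl (fun d robot =>
        let p := (PySem.List.pyGet? robot 0).getD (0, 0)
        d.modify p.2 [] (fun v => v ++ [p.1])) PySem.Dict.empty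
      = ((pvPts robots).map (fun p => (p.2, p.1))).foldl
          (fun d q => d.modify q.1 [] (fun v => v ++ [q.2])) PySem.Dict.empty := by
    simp [pvPts, List.foldl_map]
  rw [h, PySem.Dict.getD_foldl_modify_append]
  simp [List.filter_map, List.map_map, Function.comp_def]
-- the keys of B's dict are the distinct rows, and they are Nodup
lemma buckets_keys (robots : List (List (Int × Int))) :
    (robots.foldl (fun d robot =>
        let p := (PySem.List.pyGet? robot 0).getD (0, 0)
        d.modify p.2 [] (fun v => v ++ [p.1])) PySem.Dict.empty).keys
    = PySem.Set.ofList ((pvPts robots).map (fun p => p.2)) := by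
  have h := PySem.Dict.keys_foldl_modify_key robots
      (fun robot => ((PySem.List.pyGet? robot 0).getD (0, 0)).2) []
      (fun _ robot => fun v => v ++ [((PySem.List.pyGet? robot 0).getD (0, 0)).1])
      PySem.Dict.empty
  simpa [pvPts, List.map_map, Function.comp_def] using h

lemma buckets_keys_nodup (robots : List (List (Int × Int))) :
    (robots.foldl (fun d robot =>
        let p := (PySem.List.pyGet? robot 0).getD (0, 0)
        d.modify p.2 [] (fun v => v ++ [p.1])) PySem.Dict.empty).keys.Nodup := by
  exact PySem.Dict.nodup_keys_foldl_modify_key robots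
      (fun robot => ((PySem.List.pyGet? robot 0).getD (0, 0)).2) []
      (fun _ robot => fun v => v ++ [((PySem.List.pyGet? robot 0).getD (0, 0)).1])
      PySem.Dict.empty PySem.Dict.nodup_keys_empty

-- ===== VERDICT (by name: the statement is the Claim_ definition above) =====
theorem check_spec : Claim_equal_check := by
  intro robots _ _
  unfold Spec_check
  have hA : check robots
      = (PySem.List.pyRange 0 103).any (fun row =>
          rowScan (PySem.List.sorted
            (((pvPts robots).filter (fun p => p.2 == row)).map (fun p => p.1)) (fun x => x) false)) := by
    unfold check pvPts
    congr 1
    funext row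
    rw [colsA_eq]
  have hB : check_alt robots
      = (PySem.Set.ofList ((pvPts robots).map (fun p => p.2))).any (fun r =>
          (0 ≤ r && r < 103) &&
          rowScan (PySem.List.sorted
            (((pvPts robots).filter (fun p => p.2 == r)).map (fun p => p.1)) (fun x => x) false)) := by
    unfold check_alt
    rw [PySem.Dict.items_eq_map_keys _ (buckets_keys_nodup robots) [],
        List.any_map, buckets_keys robots]
    congr 1
    funext r
    simp only [Function.comp_apply, buckets_getD robots r]
  rw [hA, hB, Bool.eq_iff_iff]
  simp only [List.any_eq_true]
  constructor
  · rintro ⟨row, hmem, hscan⟩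
    refine ⟨row, ?_, ?_⟩
    · -- the row is nonempty (rowScan [] = false), hence present among the points' rows
      have hne : ((pvPts robots).filter (fun p => p.2 == row)) ≠ [] := by
        intro hnil
        rw [show ((pvPts robots).filter (fun p => p.2 == row)).map (fun p => p.1) = [] by
              simp [hnil]] at hscan
        rw [(PySem.List.sorted_eq_nil_iff _ _ _).mpr rfl] at hscan
        simp [rowScan] at hscan
      rcases List.exists_mem_of_ne_nil _ hne with ⟨q, hq⟩
      have hq1 := List.mem_filter.mp hq
      rw [PySem.Set.mem_ofList]
      exact List.mem_map.mpr ⟨q, hq1.1, by simpa using hq1.2⟩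
    · have hr := PySem.List.mem_pyRange_one.mp hmem
      simp only [Bool.and_eq_true, decide_eq_true_eq]
      exact ⟨⟨hr.1, hr.2⟩, hscan⟩
  · rintro ⟨r, _, hgood⟩
    simp only [Bool.and_eq_true, decide_eq_true_eq] at hgood
    exact ⟨r, PySem.List.mem_pyRange_one.mpr ⟨hgood.1.1, hgood.1.2⟩, hgood.2⟩
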